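-- pv_equiv track=rewrite | github.com/portland-laws/portland-laws.github.io | ppd/daemon/ppd_supervisor.py | has_checkbox_108_supersession_prerequisites
-- ===== SOURCE A (Python) =====
-- from typing import Any, Optional
--
-- def has_checkbox_108_supersession_prerequisites(rows: list[dict[str, Any]]) -> bool:
--     """Return True when accepted work covers the checkbox-133 prerequisites."""
--
--     accepted_text = "\n".join(
--         " ".join(
--             str(row.get(field) or "")
--             for field in ("target_task", "summary", "impact")
--         ).lower()
--         for row in rows
--         if row.get("applied") and row.get("validation_passed") and not row.get("errors")
--     )
--     required_markers = (
--         "checkbox-130",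
--         "checkbox-131",
--         "checkbox-109",
--         "queued",
--         "accepted",
--         "skipped",
--         "deferred",
--         "allowlist",
--         "robots/no-persist",
--         "content-type",
--         "timeout",
--         "processor-handoff",
--     )
--     return all(marker in accepted_text for marker in required_markers)
-- ===== SOURCE B (Python) =====
-- def has_checkbox_108_supersession_prerequisites(rows: list) -> bool:
--     """Return True when accepted work covers the checkbox-133 prerequisites."""
--
--     def covered(marker):
--         for row in rows:
--             if not (row.get("applied") and row.get("validation_passed") and not row.get("errors")):
--                 continue
--             text = (
--                 str(row.get("target_task") or "")
--                 + " "
--                 + str(row.get("summary") or "")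
--                 + " "
--                 + str(row.get("impact") or "")
--             ).lower()
--             if marker in text:
--                 return True
--         return False
--
--     for marker in (
--         "checkbox-130",
--         "checkbox-131",
--         "checkbox-109",
--         "queued",
--         "accepted",
--         "skipped",
--         "deferred",
--         "allowlist",
--         "robots/no-persist",
--         "content-type",
--         "timeout",
--         "processor-handoff",
--     ):
--         if not covered(marker):
--             return False
--     return True
-- ===== Notes on version B (the rewrite author's own statement) =====
-- stated objective: alternative
-- what changed: A builds one big newline-joined text of all accepted rows and then scans it once per marker; B never builds that joined string: it is marker-major, scanning the rows afresh for each marker and returning False as soon as one marker is found in no accepted row's text (correct because no marker contains a newline, so occurrence in the joined text equals occurrence in some row's text).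
import Mathlib
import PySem

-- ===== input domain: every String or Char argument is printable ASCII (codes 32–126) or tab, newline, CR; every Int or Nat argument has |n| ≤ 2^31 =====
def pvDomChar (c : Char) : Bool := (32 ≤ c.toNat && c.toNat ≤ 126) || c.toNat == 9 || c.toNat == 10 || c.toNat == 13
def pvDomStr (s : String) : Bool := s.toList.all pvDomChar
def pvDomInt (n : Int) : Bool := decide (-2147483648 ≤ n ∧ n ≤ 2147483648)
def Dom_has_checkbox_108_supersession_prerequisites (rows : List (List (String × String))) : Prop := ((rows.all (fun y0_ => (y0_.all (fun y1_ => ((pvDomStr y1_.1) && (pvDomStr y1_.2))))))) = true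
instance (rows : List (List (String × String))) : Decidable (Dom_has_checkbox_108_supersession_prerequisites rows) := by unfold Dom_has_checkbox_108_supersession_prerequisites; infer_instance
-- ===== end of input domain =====

-- B is marker-major: instead of A's one newline-joined text of all accepted rows scanned once per
-- marker, B scans the rows afresh per marker and fails fast on the first uncovered marker
-- (alternative decomposition; correct because no marker contains a newline).

-- ===== PORT A =====
-- str(row.get(field) or ""): missing key or empty string both give ""
def pvGetS (row : List (String × String)) (field : String) : String :=
  ((PySem.Dict.mk row).get? field).getD ""

-- row.get("applied") and row.get("validation_passed") and not row.get("errors")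
def pvAccepted (row : List (String × String)) : Bool :=
  (pvGetS row "applied" != "") && (pvGetS row "validation_passed" != "") && (pvGetS row "errors" == "")

-- " ".join(str(row.get(field) or "") for field in ("target_task","summary","impact")).lower()
def pvRowText (row : List (String × String)) : String :=
  PySem.Str.lower (PySem.Str.join " " [pvGetS row "target_task", pvGetS row "summary", pvGetS row "impact"])

def pvMarkers : List String :=
  ["checkbox-130", "checkbox-131", "checkbox-109", "queued", "accepted", "skipped",
   "deferred", "allowlist", "robots/no-persist", "content-type", "timeout", "processor-handoff"]

def has_checkbox_108_supersession_prerequisites (rows : List (List (String × String))) : Bool :=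
  let accepted_text := PySem.Str.join "\n" ((rows.filter pvAccepted).map pvRowText)
  pvMarkers.all (fun marker => PySem.Str.isIn marker accepted_text)

-- ===== PORT B =====
-- truthiness of row.get(k): None and "" are falsy
def altTruthy (o : Option String) : Bool :=
  match o with
  | none => false
  | some s => s != ""

-- the accepted-row test of Source B's inner loop
def altOk (row : List (String × String)) : Bool :=
  altTruthy ((PySem.Dict.mk row).get? "applied")
    && altTruthy ((PySem.Dict.mk row).get? "validation_passed")
    && !altTruthy ((PySem.Dict.mk row).get? "errors")

-- (str(... or "") + " " + str(... or "") + " " + str(... or "")).lower()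
def altText (row : List (String × String)) : String :=
  PySem.Str.lower
    (((PySem.Dict.mk row).get? "target_task").getD "" ++ " "
      ++ ((PySem.Dict.mk row).get? "summary").getD "" ++ " "
      ++ ((PySem.Dict.mk row).get? "impact").getD "")

-- def covered(marker): for row in rows: … return True / return False
def altCovered (rows : List (List (String × String))) (marker : String) : Bool :=
  match rows with
  | [] => false
  | row :: rest =>
    if altOk row then
      if PySem.Str.isIn marker (altText row) then true else altCovered rest marker
    else altCovered rest marker

-- the outer marker loop: return False on the first uncovered marker
def altLoop (rows : List (List (String × String))) (markers : List String) : Bool :=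
  match markers with
  | [] => true
  | m :: ms => if altCovered rows m then altLoop rows ms else false

def has_checkbox_108_supersession_prerequisites_alt (rows : List (List (String × String))) : Bool :=
  altLoop rows
    ["checkbox-130", "checkbox-131", "checkbox-109", "queued", "accepted", "skipped",
     "deferred", "allowlist", "robots/no-persist", "content-type", "timeout", "processor-handoff"]

-- ===== PRECONDITION & SPEC =====
def Spec_has_checkbox_108_supersession_prerequisites (rows : List (List (String × String))) (out : Bool) : Prop := out = has_checkbox_108_supersession_prerequisites_alt rows
instance (rows : List (List (String × String))) (out : Bool) : Decidable (Spec_has_checkbox_108_supersession_prerequisites rows out) := by unfold Spec_has_checkbox_108_supersession_prerequisites; infer_instance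

-- ===== CLAIM (what is proved, stated in full; the proofs are below) =====
def Claim_equal_has_checkbox_108_supersession_prerequisites : Prop := ∀ (rows : List (List (String × String))), Dom_has_checkbox_108_supersession_prerequisites rows → Spec_has_checkbox_108_supersession_prerequisites rows (has_checkbox_108_supersession_prerequisites rows)

-- ===== LEMMAS AND PROOFS =====

-- a prefix that misses c stops before an occurrence of c
lemma prefix_of_prefix_append_cons {α : Type} {m u v : List α} {c : α}
    (h : m <+: u ++ c :: v) (hc : c ∉ m) : m <+: u := by
  by_cases hle : m.length ≤ u.length
  case pos =>
    have heq := List.prefix_iff_eq_take.mp h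
    rw [List.take_append_of_le_length hle] at heq
    rw [heq]
    exact List.take_prefix _ _
  case neg =>
    exfalso
    have hlt : u.length < m.length := Nat.lt_of_not_le hle
    have hlen : u.length < (u ++ c :: v).length := by simp
    have h1 : m[u.length]'hlt = (u ++ c :: v)[u.length]'hlen := h.getElem hlt
    have h2 : (u ++ c :: v)[u.length]'hlen = c := by simp
    refine hc ?_
    rw [← h2, ← h1]
    exact m.getElem_mem hlt

-- an infix missing c of (u ++ c :: v) lies wholly inside u or wholly inside v
lemma infix_append_cons_iff {α : Type} {m : List α} (c : α) (hc : c ∉ m) :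
    ∀ u v : List α, m <:+: u ++ c :: v ↔ m <:+: u ∨ m <:+: v := by
  intro u v
  induction u with
  | nil =>
    simp only [List.nil_append]
    constructor
    · intro h
      rcases List.infix_cons_iff.mp h with hp | hi
      · cases m with
        | nil => exact Or.inl (List.infix_nil.mpr rfl)
        | cons a t =>
          obtain ⟨rfl, -⟩ := List.cons_prefix_cons.mp hp
          exact absurd List.mem_cons_self hc
      · exact Or.inr hi
    · rintro (h | h)
      · rw [List.infix_nil.mp h]
        exact List.nil_infix
      · exact h.trans ⟨[c], [], by simp⟩
  | cons x u ih =>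
    constructor
    · intro h
      rcases List.infix_cons_iff.mp h with hp | hi
      · exact Or.inl (prefix_of_prefix_append_cons (by simpa using hp) hc).isInfix
      · rcases ih.mp hi with h1 | h1
        · exact Or.inl (h1.trans ⟨[x], [], by simp⟩)
        · exact Or.inr h1
    · rintro (h | h)
      · exact h.trans ⟨[], c :: v, by simp⟩
      · exact h.trans ⟨x :: u ++ [c], [], by simp⟩

-- membership in the newline-join of a list of texts, for a pattern without '\n'
lemma isIn_join_newline {m : List Char} (hnl : '\n' ∉ m) (hne : m ≠ []) :
    ∀ parts : List (List Char),
      PySem.Chars.isIn m (PySem.Chars.join ['\n'] parts) = true ↔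
        ∃ t ∈ parts, PySem.Chars.isIn m t = true := by
  intro parts
  induction parts with
  | nil =>
    simp [PySem.Chars.join_nil, PySem.Chars.isIn_iff_infix, List.infix_nil, hne]
  | cons p rest ih =>
    cases rest with
    | nil =>
      rw [PySem.Chars.join_singleton]
      simp
    | cons q rest' =>
      rw [PySem.Chars.join_cons_cons]
      rw [PySem.Chars.isIn_iff_infix]
      have hsh : p ++ ['\n'] ++ PySem.Chars.join ['\n'] (q :: rest') =
          p ++ '\n' :: PySem.Chars.join ['\n'] (q :: rest') := by simp
      rw [hsh, infix_append_cons_iff '\n' hnl]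
      rw [← PySem.Chars.isIn_iff_infix, ← PySem.Chars.isIn_iff_infix, ih]
      constructor
      · rintro (h | ⟨t, ht, h⟩)
        · exact ⟨p, by simp, h⟩
        · exact ⟨t, by simp [ht], h⟩
      · rintro ⟨t, ht, h⟩
        rcases List.mem_cons.mp ht with rfl | ht'
        · exact Or.inl h
        · exact Or.inr ⟨t, ht', h⟩

-- every required marker is a nonempty string without a newline
lemma pvMarkers_clean : ∀ m ∈ pvMarkers, '\n' ∉ m.toList ∧ m.toList ≠ [] := by decide

-- characterisation of A: every marker occurs in some accepted row's text
lemma portA_iff (rows : List (List (String × String))) :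
    has_checkbox_108_supersession_prerequisites rows = true ↔
      ∀ m ∈ pvMarkers, ∃ r ∈ rows, pvAccepted r = true ∧ PySem.Str.isIn m (pvRowText r) = true := by
  unfold has_checkbox_108_supersession_prerequisites
  rw [List.all_eq_true]
  refine forall_congr' fun m => imp_congr_right fun hmem => ?_
  obtain ⟨hnl, hne⟩ := pvMarkers_clean m hmem
  rw [PySem.Str.isIn_eq, PySem.Str.toList_join]
  rw [show ("\n" : String).toList = ['\n'] from rfl]
  rw [isIn_join_newline hnl hne (((rows.filter pvAccepted).map pvRowText).map String.toList)]
  constructor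
  · rintro ⟨t, ht, h⟩
    rcases List.mem_map.mp ht with ⟨s, hs, rfl⟩
    rcases List.mem_map.mp hs with ⟨r, hr, rfl⟩
    rcases List.mem_filter.mp hr with ⟨hr1, hr2⟩
    exact ⟨r, hr1, hr2, by rw [PySem.Str.isIn_eq]; exact h⟩
  · rintro ⟨r, hr, hacc, h⟩
    exact ⟨(pvRowText r).toList,
      List.mem_map.mpr ⟨pvRowText r, List.mem_map.mpr ⟨r, List.mem_filter.mpr ⟨hr, hacc⟩, rfl⟩, rfl⟩,
      by rw [PySem.Str.isIn_eq] at h; exact h⟩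

-- B's accepted-row test agrees with A's
lemma altOk_eq (row : List (String × String)) : altOk row = pvAccepted row := by
  unfold altOk pvAccepted pvGetS
  cases h1 : (PySem.Dict.mk row).get? "applied" <;>
    cases h2 : (PySem.Dict.mk row).get? "validation_passed" <;>
      cases h3 : (PySem.Dict.mk row).get? "errors" <;>
        simp [altTruthy, Bool.not_eq, bne]

-- B's per-row text has the same characters as A's
lemma altText_toList (row : List (String × String)) :
    (altText row).toList = (pvRowText row).toList := by
  unfold altText pvRowText pvGetS
  rw [PySem.Str.toList_lower, PySem.Str.toList_lower, PySem.Str.toList_join]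
  simp only [List.map_cons, List.map_nil]
  rw [show ((" " : String).toList) = [' '] from rfl]
  rw [PySem.Chars.join_cons_cons, PySem.Chars.join_cons_cons, PySem.Chars.join_singleton]
  simp

-- covered(marker): some accepted row's text contains the marker
lemma altCovered_iff (marker : String) :
    ∀ rows : List (List (String × String)),
      altCovered rows marker = true ↔
        ∃ r ∈ rows, pvAccepted r = true ∧ PySem.Str.isIn marker (pvRowText r) = true := by
  intro rows
  induction rows with
  | nil => simp [altCovered]
  | cons row rest ih =>
    unfold altCovered
    have htext : PySem.Str.isIn marker (altText row) = PySem.Str.isIn marker (pvRowText row) := by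
      rw [PySem.Str.isIn_eq, PySem.Str.isIn_eq, altText_toList]
    rw [altOk_eq, htext]
    by_cases hacc : pvAccepted row = true
    · rw [if_pos hacc]
      by_cases hin : PySem.Str.isIn marker (pvRowText row) = true
      · rw [if_pos hin]
        simp only [true_iff]
        exact ⟨row, List.mem_cons_self, hacc, hin⟩
      · rw [if_neg hin, ih]
        constructor
        · rintro ⟨r, hr, h1, h2⟩
          exact ⟨r, List.mem_cons_of_mem _ hr, h1, h2⟩
        · rintro ⟨r, hr, h1, h2⟩
          rcases List.mem_cons.mp hr with rfl | hr'
          · exact absurd h2 hin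
          · exact ⟨r, hr', h1, h2⟩
    · rw [if_neg hacc, ih]
      constructor
      · rintro ⟨r, hr, h1, h2⟩
        exact ⟨r, List.mem_cons_of_mem _ hr, h1, h2⟩
      · rintro ⟨r, hr, h1, h2⟩
        rcases List.mem_cons.mp hr with rfl | hr'
        · exact absurd h1 hacc
        · exact ⟨r, hr', h1, h2⟩

-- the outer marker loop succeeds iff every marker is covered
lemma altLoop_iff (rows : List (List (String × String))) :
    ∀ markers : List String,
      altLoop rows markers = true ↔ ∀ m ∈ markers, altCovered rows m = true := by
  intro markers
  induction markers with
  | nil => simp [altLoop]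
  | cons m ms ih =>
    unfold altLoop
    by_cases hm : altCovered rows m = true
    · rw [if_pos hm, ih]
      constructor
      · intro h m' hm'
        rcases List.mem_cons.mp hm' with rfl | h'
        · exact hm
        · exact h m' h'
      · intro h m' hm'
        exact h m' (List.mem_cons_of_mem _ hm')
    · rw [if_neg hm]
      exact ⟨fun h => absurd h (by simp), fun h => absurd (h m List.mem_cons_self) hm⟩

-- ===== VERDICT (by name: the statement is the Claim_ definition above) =====
theorem has_checkbox_108_supersession_prerequisites_spec : Claim_equal_has_checkbox_108_supersession_prerequisites := by
  intro rows _
  show has_checkbox_108_supersession_prerequisites rows = has_checkbox_108_supersession_prerequisites_alt rows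
  have hA := portA_iff rows
  have hB : has_checkbox_108_supersession_prerequisites_alt rows = true ↔
      ∀ m ∈ pvMarkers, ∃ r ∈ rows, pvAccepted r = true ∧ PySem.Str.isIn m (pvRowText r) = true := by
    rw [show has_checkbox_108_supersession_prerequisites_alt rows = altLoop rows pvMarkers from rfl]
    rw [altLoop_iff rows pvMarkers]
    exact forall₂_congr fun m _ => altCovered_iff m rows
  cases hA' : has_checkbox_108_supersession_prerequisites rows with
  | false =>
    cases hB' : has_checkbox_108_supersession_prerequisites_alt rows with
    | false => rfl
    | true =>
      have := hA.mpr (hB.mp hB')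
      rw [hA'] at this
      exact absurd this (by simp)
  | true => exact (hB.mpr (hA.mp hA')).symm
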